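-- pv_equiv track=rewrite | github.com/StevenButtifint/database-cleaner | res/operations.py | calculate_tenth_sums
-- ===== SOURCE A (Python) =====
-- def calculate_tenth_sums(data):
--     total_count = len(data)
--     interval_size = total_count // 10
--     tenth_sums = []
--     current_position = 0
--     for _ in range(10):
--         end_position = current_position + interval_size
--         tenth_sum = sum(data[current_position:end_position])
--         tenth_sums.append(tenth_sum)
--         current_position = end_position
--     return tenth_sums
-- ===== SOURCE B (Python) =====
-- def calculate_tenth_sums(data):
--     interval_size = len(data) // 10
--     prefix = [0]
--     total = 0
--     for x in data:
--         total += x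
--         prefix.append(total)
--     return [prefix[(i + 1) * interval_size] - prefix[i * interval_size]
--             for i in range(10)]
-- ===== Notes on version B (the rewrite author's own statement) =====
-- stated objective: alternative
-- what changed: Replaces the ten slice-and-sum passes by one pass building a prefix-sum array and returning the ten differences prefix[(i+1)k]-prefix[ik].
import Mathlib
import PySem

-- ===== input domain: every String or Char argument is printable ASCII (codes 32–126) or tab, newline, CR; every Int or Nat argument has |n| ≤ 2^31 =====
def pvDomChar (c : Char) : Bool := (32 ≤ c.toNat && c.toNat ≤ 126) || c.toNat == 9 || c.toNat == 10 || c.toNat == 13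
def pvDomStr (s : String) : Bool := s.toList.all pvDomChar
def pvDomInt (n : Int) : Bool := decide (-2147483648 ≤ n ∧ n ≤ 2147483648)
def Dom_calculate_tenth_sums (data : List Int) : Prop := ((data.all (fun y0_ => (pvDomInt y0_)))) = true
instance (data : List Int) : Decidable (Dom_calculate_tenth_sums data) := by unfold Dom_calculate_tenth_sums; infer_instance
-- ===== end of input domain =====

-- B replaces the ten slice-and-sum passes by one prefix-sum pass plus ten differences (objective: alternative).

-- ===== PORT A =====
def calculate_tenth_sums (data : List Int) : List Int :=
  let total_count : Int := data.length
  let interval_size : Int := PySem.Int.floordiv total_count 10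
  ((PySem.List.pyRange 0 10 1).foldl
    (fun (st : List Int × Int) _ =>
      let end_position := st.2 + interval_size
      let tenth_sum := (PySem.List.slice data (some st.2) (some end_position)).sum
      (st.1 ++ [tenth_sum], end_position))
    ([], 0)).1

-- ===== PORT B =====
-- indices (i+1)*interval_size ≤ len(data) < len(prefix) are always in range, so pyGetD's default is never used
def calculate_tenth_sums_alt (data : List Int) : List Int :=
  let interval_size : Int := PySem.Int.floordiv data.length 10
  let pref := (data.foldl
    (fun (st : List Int × Int) x =>
      let t := st.2 + x
      (st.1 ++ [t], t))
    ([0], 0)).1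
  (PySem.List.pyRange 0 10 1).map (fun i =>
    PySem.List.pyGetD pref ((i + 1) * interval_size) 0
      - PySem.List.pyGetD pref (i * interval_size) 0)

-- ===== PRECONDITION & SPEC =====
def Spec_calculate_tenth_sums (data : List Int) (out : List Int) : Prop := out = calculate_tenth_sums_alt data
instance (data : List Int) (out : List Int) : Decidable (Spec_calculate_tenth_sums data out) := by unfold Spec_calculate_tenth_sums; infer_instance

-- ===== CLAIM (what is proved, stated in full; the proofs are below) =====
def Claim_equal_calculate_tenth_sums : Prop := ∀ (data : List Int), Dom_calculate_tenth_sums data → Spec_calculate_tenth_sums data (calculate_tenth_sums data)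

-- ===== LEMMAS AND PROOFS =====

theorem pv_floordiv_natCast (n : Nat) : PySem.Int.floordiv (n : Int) 10 = ((n / 10 : Nat) : Int) := by
  exact_mod_cast PySem.Int.floordiv_natCast n 10

-- A's fold over the 10 iterations, generalized over the remaining iterations and start position
theorem pv_A_fold (data : List Int) (k : Nat) (l : List Int) :
    ∀ (acc : List Int) (j : Nat),
    (l.foldl
      (fun (st : List Int × Int) _ =>
        (st.1 ++ [(PySem.List.slice data (some st.2) (some (st.2 + (k : Int)))).sum], st.2 + (k : Int)))
      (acc, ((j * k : Nat) : Int))).1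
    = acc ++ (List.range l.length).map (fun i => ((data.drop ((j + i) * k)).take k).sum) := by
  induction l with
  | nil => intro acc j; simp
  | cons y ys ih =>
    intro acc j
    have hcast : ((j * k : Nat) : Int) + (k : Int) = (((j + 1) * k : Nat) : Int) := by
      push_cast; ring
    have hslice : PySem.List.slice data (some ((j * k : Nat) : Int))
        (some ((((j + 1) * k : Nat)) : Int)) = (data.drop (j * k)).take k := by
      rw [show ((((j + 1) * k : Nat)) : Int) = ((j * k : Nat) : Int) + ((k : Nat) : Int) by push_cast; ring]
      exact PySem.List.slice_natCast_add data (j * k) k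
    simp only [List.foldl_cons, hcast, hslice]
    rw [ih (acc ++ [((data.drop (j * k)).take k).sum]) (j + 1)]
    simp only [List.length_cons, List.range_succ_eq_map, List.map_cons, List.map_map,
      List.append_assoc, List.singleton_append]
    congr 2
    refine List.map_congr_left fun i _ => ?_
    simp only [Function.comp, Nat.succ_eq_add_one]
    congr 3
    ring

-- B's fold builds the prefix-sum list
theorem pv_B_fold (xs : List Int) :
    ∀ (acc : List Int) (t : Int),
    (xs.foldl
      (fun (st : List Int × Int) x =>
        (st.1 ++ [st.2 + x], st.2 + x))
      (acc, t)).1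
    = acc ++ (List.range xs.length).map (fun j => t + (xs.take (j + 1)).sum) := by
  induction xs with
  | nil => intro acc t; simp
  | cons x xs ih =>
    intro acc t
    simp only [List.foldl_cons]
    rw [ih (acc ++ [t + x]) (t + x)]
    simp only [List.length_cons, List.range_succ_eq_map, List.map_cons, List.map_map,
      List.append_assoc, List.singleton_append]
    congr 2
    · simp
    · congr 1; funext j; simp [Function.comp]; ring

theorem pv_prefix_eq (data : List Int) :
    ([0] : List Int) ++ (List.range data.length).map (fun j => 0 + (data.take (j + 1)).sum)
    = (List.range (data.length + 1)).map (fun j => (data.take j).sum) := by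
  rw [List.range_succ_eq_map, List.map_cons, List.map_map]
  simp [Function.comp]

-- ===== VERDICT (by name: the statement is the Claim_ definition above) =====
theorem calculate_tenth_sums_spec : Claim_equal_calculate_tenth_sums := by
  intro data _
  unfold Spec_calculate_tenth_sums calculate_tenth_sums calculate_tenth_sums_alt
  simp only [pv_floordiv_natCast]
  have hA := pv_A_fold data (data.length / 10) (PySem.List.pyRange 0 10 1) [] 0
  have h0 : ((0 * (data.length / 10) : Nat) : Int) = 0 := by simp
  rw [h0] at hA
  rw [hA]
  have hB := pv_B_fold data [0] 0
  rw [hB, pv_prefix_eq data]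
  have hlen : (PySem.List.pyRange 0 10 1).length = 10 := by decide
  rw [hlen]
  rw [PySem.List.pyRange_one]
  have h10 : ((10 - 0 : Int)).toNat = 10 := by decide
  rw [h10, List.map_map]
  simp only [List.nil_append]
  refine List.map_congr_left fun a ha => ?_
  simp only [Nat.zero_add]
  have ha10 : a < 10 := List.mem_range.mp ha
  have hbound : 10 * (data.length / 10) ≤ data.length := by omega
  have hb1 : (a + 1) * (data.length / 10) < data.length + 1 := by
    have : (a + 1) * (data.length / 10) ≤ 10 * (data.length / 10) :=
      Nat.mul_le_mul_right _ (by omega)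
    omega
  have hb0 : a * (data.length / 10) < data.length + 1 := by
    have : a * (data.length / 10) ≤ 10 * (data.length / 10) :=
      Nat.mul_le_mul_right _ (by omega)
    omega
  have hc1 : ((0 : Int) + (a : Int) + 1) * ((data.length / 10 : Nat) : Int)
      = (((a + 1) * (data.length / 10) : Nat) : Int) := by push_cast; ring
  have hc0 : ((0 : Int) + (a : Int)) * ((data.length / 10 : Nat) : Int)
      = (((a * (data.length / 10) : Nat)) : Int) := by push_cast; ring
  simp only [Function.comp, hc1, hc0, PySem.List.pyGetD_natCast]
  rw [List.getD_eq_getElem?_getD, List.getD_eq_getElem?_getD,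
    List.getElem?_map, List.getElem?_map]
  rw [List.getElem?_range hb1, List.getElem?_range hb0]
  simp only [Option.map_some, Option.getD_some]
  have hsplit : (a + 1) * (data.length / 10) = a * (data.length / 10) + data.length / 10 := by ring
  rw [hsplit, List.take_add, List.sum_append]
  ring
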